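-- pv_equiv track=rewrite | github.com/anipshah/geeksforgeeks_problems | firsttimes.py | ktimes
-- ===== SOURCE A (Python) =====
-- def ktimes(l,k):
--     """
--     :param l: array of numbers
--     :param k: key
--     :return: first element occurring k times in array
--     """
--     count_dic={}
--     for i in range(len(l)):
--         if l[i] in count_dic:
--             count_dic[l[i]]+=1
--         else:
--             count_dic[l[i]]=1
--
--     for i in range(len(l)):
--         if count_dic[l[i]]==k:
--             return l[i]
--     return -1
-- ===== SOURCE B (Python) =====
-- def ktimes(l, k):
--     # Value-elimination: peel off one distinct value at a time (in first-occurrence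
--     # order); its count is the length drop after filtering it out.
--     while l:
--         x = l[0]
--         rest = [y for y in l if y != x]
--         if len(l) - len(rest) == k:
--             return x
--         l = rest
--     return -1
-- ===== Notes on version B (the rewrite author's own statement) =====
-- stated objective: alternative
-- what changed: Replaces the count-dictionary-plus-second-scan with iterative value elimination: repeatedly take the leading value, obtain its count as the length drop after filtering it out of the list, return it if the count is k, otherwise continue on the filtered list.
import Mathlib
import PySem

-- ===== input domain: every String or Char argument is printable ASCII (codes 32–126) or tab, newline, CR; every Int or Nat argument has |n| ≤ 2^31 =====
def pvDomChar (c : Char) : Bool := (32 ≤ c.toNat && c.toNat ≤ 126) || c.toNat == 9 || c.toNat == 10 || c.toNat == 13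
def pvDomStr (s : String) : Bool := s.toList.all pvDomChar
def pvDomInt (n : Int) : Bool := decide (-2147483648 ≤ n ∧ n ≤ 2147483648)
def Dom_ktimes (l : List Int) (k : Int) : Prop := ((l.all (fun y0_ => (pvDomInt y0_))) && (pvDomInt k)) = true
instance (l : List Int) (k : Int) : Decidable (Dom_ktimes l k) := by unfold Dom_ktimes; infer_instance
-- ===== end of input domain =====

-- B replaces A's count-dictionary + second scan by iterative value elimination:
-- peel off one distinct value at a time, its count read off as a length drop
-- after filtering it out (alternative decomposition; not faster).

-- ===== PORT A =====
-- first loop of A: build count_dic (if key present increment, else set to 1)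
def ktimesBuild (l : List Int) : PySem.Dict Int Int :=
  l.foldl (fun d x => if d.contains x then d.modify x 0 (· + 1) else d.insert x 1)
    PySem.Dict.empty

-- second loop of A: first element whose stored count equals k (the scanned keys
-- are always present, so the dict access is getD)
def ktimesScan (k : Int) (d : PySem.Dict Int Int) : List Int → Int
  | [] => -1
  | x :: rest => if d.getD x 0 == k then x else ktimesScan k d rest

def ktimes (l : List Int) (k : Int) : Int :=
  ktimesScan k (ktimesBuild l) l

-- ===== PORT B =====
-- Source B's while loop: recursion on the shrinking list
def ktimesAltGo (k : Int) : List Int → Int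
  | [] => -1
  | x :: t =>
      let rest := (x :: t).filter (fun y => y != x)
      if (((x :: t).length : Int) - rest.length) == k then x
      else ktimesAltGo k rest
termination_by l => l.length
decreasing_by
  simp only [List.filter_cons, List.length_cons, bne_self_eq_false, Bool.false_eq_true,
    if_false]
  exact Nat.lt_succ_of_le (List.length_filter_le _ t)

def ktimes_alt (l : List Int) (k : Int) : Int := ktimesAltGo k l

-- ===== PRECONDITION & SPEC =====
def Spec_ktimes (l : List Int) (k : Int) (out : Int) : Prop := out = ktimes_alt l k
instance (l : List Int) (k : Int) (out : Int) : Decidable (Spec_ktimes l k out) := by unfold Spec_ktimes; infer_instance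

-- ===== CLAIM (what is proved, stated in full; the proofs are below) =====
def Claim_equal_ktimes : Prop := ∀ (l : List Int) (k : Int), Dom_ktimes l k → Spec_ktimes l k (ktimes l k)

-- ===== LEMMAS AND PROOFS =====

-- common characterisation: first element of l whose total count in l equals k
def firstK (l : List Int) (k : Int) : Int :=
  match l.find? (fun y => ((l.count y : Int) == k)) with
  | some y => y
  | none => -1

-- A's dictionary stores exactly the occurrence counts
lemma getD_ktimesBuild_gen (l : List Int) (d : PySem.Dict Int Int) (v : Int) :
    (l.foldl (fun d x => if d.contains x then d.modify x 0 (· + 1) else d.insert x 1) d).getD v 0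
      = d.getD v 0 + (l.count v : Int) := by
  induction l generalizing d with
  | nil => simp
  | cons x rest ih =>
    simp only [List.foldl_cons]
    by_cases hc : d.contains x
    · rw [if_pos hc, ih, PySem.Dict.getD_modify]
      rcases eq_or_ne v x with h | h
      · subst h; simp; omega
      · simp [h, Ne.symm h]
    · rw [if_neg hc, ih, PySem.Dict.getD_insert]
      rcases eq_or_ne v x with h | h
      · subst h
        rw [PySem.Dict.getD_of_not_contains _ _ (by simpa using hc)]
        simp; omega
      · simp [h, Ne.symm h]

lemma scan_eq_find (l : List Int) (k : Int) (d : PySem.Dict Int Int)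
    (h : ∀ v, d.getD v 0 = (l.count v : Int)) :
    ∀ m : List Int,
      ktimesScan k d m =
        (match m.find? (fun y => ((l.count y : Int) == k)) with
          | some y => y | none => -1) := by
  intro m
  induction m with
  | nil => rfl
  | cons x rest ih =>
    simp only [ktimesScan, List.find?, h x]
    by_cases hx : ((l.count x : Int) == k)
    · simp [hx]
    · simp [hx, ih]

lemma ktimes_eq_firstK (l : List Int) (k : Int) : ktimes l k = firstK l k := by
  unfold ktimes firstK ktimesBuild
  exact scan_eq_find l k _ (fun v => by
    have := getD_ktimesBuild_gen l PySem.Dict.empty v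
    simpa [ktimesBuild] using this) l

-- count is the length drop after filtering the value out
lemma filter_len_count (l : List Int) (x : Int) :
    (l.filter (fun y => y != x)).length + l.count x = l.length := by
  induction l with
  | nil => simp
  | cons a t ih =>
    by_cases h : a = x
    · subst h; simp [List.filter_cons, List.count_cons]; omega
    · simp [List.filter_cons, List.count_cons, h]; omega

-- filtering a value out preserves counts of the survivors
lemma count_filter_ne (l : List Int) (x y : Int) (hy : y ≠ x) :
    (l.filter (fun z => z != x)).count y = l.count y := by
  induction l with
  | nil => simp
  | cons a t ih =>
    by_cases h : a = x
    · subst h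
      simp [List.filter_cons, List.count_cons, ih, Ne.symm hy]
    · simp [List.filter_cons, List.count_cons, h, ih]

-- find? over m with l-counts equals find? over the filtered m with rest-counts,
-- provided x itself never matches
lemma find_filter_shift (l : List Int) (k x : Int)
    (hx : ¬ ((l.count x : Int) == k)) :
    ∀ m : List Int,
      m.find? (fun y => ((l.count y : Int) == k)) =
        (m.filter (fun y => y != x)).find?
          (fun y => (((l.filter (fun z => z != x)).count y : Int) == k)) := by
  intro m
  induction m with
  | nil => simp
  | cons a m' ih =>
    by_cases h : a = x
    · subst h
      simp only [List.find?, List.filter_cons, bne_self_eq_false, Bool.false_eq_true,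
        if_false]
      simp [hx, ih]
    · have hc : (l.filter (fun z => z != x)).count a = l.count a :=
        count_filter_ne l x a h
      simp only [List.find?, List.filter_cons, bne_iff_ne, ne_eq, h, not_false_eq_true,
        if_true, List.find?, hc]
      by_cases hp : ((l.count a : Int) == k)
      · simp [hp]
      · simp [hp, ih]

lemma altGo_eq_firstK (k : Int) :
    ∀ (n : Nat) (l : List Int), l.length ≤ n → ktimesAltGo k l = firstK l k := by
  intro n
  induction n with
  | zero =>
    intro l hl
    have : l = [] := List.eq_nil_of_length_eq_zero (Nat.le_zero.mp hl)
    subst this; simp [ktimesAltGo, firstK]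
  | succ n ih =>
    intro l hl
    match l with
    | [] => simp [ktimesAltGo, firstK]
    | x :: t =>
      rw [ktimesAltGo]
      have hlen := filter_len_count (x :: t) x
      by_cases hcond : ((((x :: t).length : Int) - ((x :: t).filter (fun y => y != x)).length) == k)
      · rw [if_pos hcond]
        have hcnt : (((x :: t).count x : Int)) = k := by
          have hb : (((x :: t).length : Int) - ((x :: t).filter (fun y => y != x)).length) = k :=
            beq_iff_eq.mp hcond
          omega
        unfold firstK
        rw [show List.find? (fun y => (((x :: t).count y : Int) == k)) (x :: t) = some x from
          List.find?_cons_of_pos (by rw [beq_iff_eq]; exact hcnt)]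
      · rw [if_neg hcond]
        have hrec : ktimesAltGo k ((x :: t).filter (fun y => y != x))
            = firstK ((x :: t).filter (fun y => y != x)) k := by
          apply ih
          have := List.length_filter_le (fun y => y != x) (x :: t)
          have hx : ((x :: t).filter (fun y => y != x)).length < (x :: t).length := by
            simp only [List.filter_cons, bne_self_eq_false, Bool.false_eq_true, if_false,
              List.length_cons]
            exact Nat.lt_succ_of_le (List.length_filter_le _ t)
          have hl' : t.length + 1 ≤ n + 1 := by simpa using hl
          simp only [List.length_cons] at hx
          omega
        rw [hrec]
        have hcnt : ¬ (((x :: t).count x : Int) == k) := by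
          intro hb
          have hb' : (((x :: t).count x : Int)) = k := beq_iff_eq.mp hb
          apply hcond
          simp only [beq_iff_eq]
          omega
        unfold firstK
        rw [find_filter_shift (x :: t) k x hcnt (x :: t)]

-- ===== VERDICT (by name: the statement is the Claim_ definition above) =====
theorem ktimes_spec : Claim_equal_ktimes := by
  intro l k _
  unfold Spec_ktimes ktimes_alt
  rw [ktimes_eq_firstK, altGo_eq_firstK k l.length l (le_refl _)]
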